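-- pv_equiv track=rewrite | github.com/Micha12344f/AgentForge | Business/STRATEGY/executions/normalize_challenges.py | split_platforms
-- ===== SOURCE A (Python) =====
-- KNOWN_PLATFORMS = [
--     "BrightFunded Platform",
--     "Match Trader",
--     "TradeLocker",
--     "TradingView",
--     "Vo Volumetrica FX",
--     "ThinkTrader",
--     "cTrader",
--     "DXTrade",
--     "DxTrade",
--     "MT4",
--     "MT5",
-- ]
--
-- PLATFORM_ALIASES = {
--     "DxTrade": "DXTrade",
--     "(DXTrade)": "DXTrade",
--     "MatchTrader": "Match Trader",
--     "(MatchTrader)": "Match Trader",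
--     "Vo Volumetrica FX": "Volumetrica FX",
-- }
--
-- PLATFORM_NOISE = {
--     "Platform",
--     "Terminal",
--     "CF",
--     "CFT",
--     "Breakout",
-- }
--
-- def split_platforms(raw_list: list[str]) -> list[str]:
--     """Split space-concatenated platform strings into individual platforms."""
--     if not raw_list:
--         return []
--     text = " ".join(raw_list)
--     platforms = []
--     remaining = text
--     while remaining.strip():
--         remaining = remaining.strip()
--         matched = False
--         for p in KNOWN_PLATFORMS:
--             if remaining.startswith(p):
--                 platforms.append(p)
--                 remaining = remaining[len(p):]
--                 matched = True
--                 break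
--         if not matched:
--             # take next word as unknown platform
--             word, *rest = remaining.split(None, 1)
--             platforms.append(word)
--             remaining = rest[0] if rest else ""
--     # dedupe while preserving order, normalize aliases, and drop noise tokens
--     seen = set()
--     out = []
--     for p in platforms:
--         norm = PLATFORM_ALIASES.get(p, p.replace("DxTrade", "DXTrade").strip())
--         if not norm:
--             continue
--         if norm.startswith("(") and norm.endswith(")"):
--             norm = norm.strip("() ")
--         norm = PLATFORM_ALIASES.get(norm, norm)
--         if not norm or norm in PLATFORM_NOISE:
--             continue
--         if norm not in seen:
--             seen.add(norm)
--             out.append(norm)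
--     return out
-- ===== SOURCE B (Python) =====
-- KNOWN_PLATFORMS = [
--     "BrightFunded Platform",
--     "Match Trader",
--     "TradeLocker",
--     "TradingView",
--     "Vo Volumetrica FX",
--     "ThinkTrader",
--     "cTrader",
--     "DXTrade",
--     "DxTrade",
--     "MT4",
--     "MT5",
-- ]
--
-- PLATFORM_ALIASES = {
--     "DxTrade": "DXTrade",
--     "(DXTrade)": "DXTrade",
--     "MatchTrader": "Match Trader",
--     "(MatchTrader)": "Match Trader",
--     "Vo Volumetrica FX": "Volumetrica FX",
-- }
--
-- PLATFORM_NOISE = {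
--     "Platform",
--     "Terminal",
--     "CF",
--     "CFT",
--     "Breakout",
-- }
--
--
-- def _tokenize(text: str) -> list[str]:
--     """Cursor-based tokenizer: skip whitespace char by char, emit a known
--     platform matched at the cursor, else the next maximal non-space run."""
--     n = len(text)
--     i = 0
--     tokens = []
--     while i < n:
--         if text[i].isspace():
--             i += 1
--             continue
--         for p in KNOWN_PLATFORMS:
--             if text.startswith(p, i):
--                 tokens.append(p)
--                 i += len(p)
--                 break
--         else:
--             j = i
--             while j < n and not text[j].isspace():
--                 j += 1
--             tokens.append(text[i:j])
--             i = j
--     return tokens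
--
--
-- def _normalize(tok: str) -> str:
--     norm = PLATFORM_ALIASES.get(tok, tok.replace("DxTrade", "DXTrade").strip())
--     if norm.startswith("(") and norm.endswith(")"):
--         norm = norm.strip("() ")
--     return PLATFORM_ALIASES.get(norm, norm)
--
--
-- def split_platforms(raw_list: list[str]) -> list[str]:
--     """Split space-concatenated platform strings into individual platforms."""
--     if not raw_list:
--         return []
--     tokens = _tokenize(" ".join(raw_list))
--     normed = [_normalize(t) for t in tokens]
--     keep = [t for t in normed if t and t not in PLATFORM_NOISE]
--     return list(dict.fromkeys(keep))
-- ===== Notes on version B (the rewrite author's own statement) =====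
-- stated objective: faster
-- what changed: Replaces A's interleaved while-loop (strip and re-slice the shrinking remaining string, and one fold that normalizes, filters and dedupes with a seen-set in the same pass) by a staged pipeline: a cursor tokenizer that skips whitespace character by character and matches known platforms at an advancing index without copying the string, then a normalization map, a filter, and an ordered dedup via dict.fromkeys.
import Mathlib
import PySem

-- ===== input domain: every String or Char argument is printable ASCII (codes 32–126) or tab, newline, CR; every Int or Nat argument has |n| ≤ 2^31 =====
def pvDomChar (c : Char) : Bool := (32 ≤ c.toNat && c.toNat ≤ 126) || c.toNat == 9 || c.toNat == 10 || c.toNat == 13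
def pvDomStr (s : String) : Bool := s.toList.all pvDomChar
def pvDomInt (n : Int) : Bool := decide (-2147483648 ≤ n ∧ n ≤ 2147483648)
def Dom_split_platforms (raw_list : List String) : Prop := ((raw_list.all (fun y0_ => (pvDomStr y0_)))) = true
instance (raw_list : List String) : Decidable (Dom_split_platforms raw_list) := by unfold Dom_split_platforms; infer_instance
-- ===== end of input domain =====

-- B restructures A's single interleaved loop into a staged pipeline (cursor tokenizer with an advancing index instead of re-slicing the remaining string, then map/filter/ordered-dedup); a timing run measured B faster on large inputs.

-- module constants shared by both Pythons (KNOWN_PLATFORMS / PLATFORM_ALIASES / PLATFORM_NOISE)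
def pvKnown : List (List Char) :=
  ["BrightFunded Platform".toList, "Match Trader".toList, "TradeLocker".toList,
   "TradingView".toList, "Vo Volumetrica FX".toList, "ThinkTrader".toList,
   "cTrader".toList, "DXTrade".toList, "DxTrade".toList, "MT4".toList, "MT5".toList]

def pvAliases : PySem.Dict (List Char) (List Char) :=
  PySem.Dict.ofList
    [("DxTrade".toList, "DXTrade".toList), ("(DXTrade)".toList, "DXTrade".toList),
     ("MatchTrader".toList, "Match Trader".toList), ("(MatchTrader)".toList, "Match Trader".toList),
     ("Vo Volumetrica FX".toList, "Volumetrica FX".toList)]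

def pvNoise : PySem.Set (List Char) :=
  PySem.Set.ofList ["Platform".toList, "Terminal".toList, "CF".toList, "CFT".toList, "Breakout".toList]

-- ===== PORT A =====

-- facts tokA's termination proof cites
theorem pvKnown_ne_nil : ∀ p ∈ pvKnown, p ≠ [] := by decide

theorem pv_strip_length_le (cs : List Char) :
    (PySem.Chars.strip cs).length ≤ cs.length := by
  simp only [PySem.Chars.strip, PySem.Chars.rstrip, PySem.Chars.lstrip, List.length_reverse]
  calc (List.dropWhile PySem.Chars.isspace (List.dropWhile PySem.Chars.isspace cs).reverse).length
      ≤ (List.dropWhile PySem.Chars.isspace cs).reverse.length := List.length_dropWhile_le _ _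
    _ ≤ cs.length := by simpa using List.length_dropWhile_le _ _

theorem pv_strip_head_not_ws (cs : List Char) (h : PySem.Chars.strip cs ≠ []) :
    ∃ c t, PySem.Chars.strip cs = c :: t ∧ PySem.Chars.isspace c = false := by
  have hpre : PySem.Chars.strip cs <+: List.dropWhile PySem.Chars.isspace cs := by
    simp only [PySem.Chars.strip, PySem.Chars.rstrip, PySem.Chars.lstrip]
    have := (List.dropWhile_suffix (l := (List.dropWhile PySem.Chars.isspace cs).reverse)
      (p := PySem.Chars.isspace)).reverse
    simpa using this
  obtain ⟨c, t, he⟩ := List.exists_cons_of_ne_nil h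
  refine ⟨c, t, he, ?_⟩
  have hh : (List.dropWhile PySem.Chars.isspace cs).head? = some c := by
    obtain ⟨u, hu⟩ := hpre
    rw [← hu, he]; rfl
  have := List.head?_dropWhile_not PySem.Chars.isspace cs
  rw [hh] at this; simpa using this

-- split(None, 1) on a nonempty string whose head is not whitespace
theorem pv_split0Max_one (r : List Char) (c : Char) (t : List Char) (he : r = c :: t)
    (hh : PySem.Chars.isspace c = false) :
    PySem.Chars.split₀Max r 1 =
      (if List.dropWhile PySem.Chars.isspace (List.dropWhile (fun d => !PySem.Chars.isspace d) r) = []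
       then [List.takeWhile (fun d => !PySem.Chars.isspace d) r]
       else [List.takeWhile (fun d => !PySem.Chars.isspace d) r,
             List.dropWhile PySem.Chars.isspace (List.dropWhile (fun d => !PySem.Chars.isspace d) r)]) := by
  subst he
  rw [PySem.Chars.split₀Max]
  simp only [show ¬((1:Int) < 0) by norm_num, if_false, Int.toNat_one, List.length_cons]
  rw [PySem.Chars.split₀Max.go]
  simp only [List.dropWhile_cons, hh, Bool.false_eq_true, if_false, Bool.not_false, if_true,
    show (1:Nat) ≠ 0 by norm_num, Nat.sub_self]
  rw [PySem.Chars.split₀Max.go]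
  have hdrop : List.dropWhile (fun d => !PySem.Chars.isspace d) (c :: t)
      = List.dropWhile (fun d => !PySem.Chars.isspace d) t := by
    simp [hh]
  rw [← hdrop]
  rcases hdw : List.dropWhile PySem.Chars.isspace
      (List.dropWhile (fun d => !PySem.Chars.isspace d) (c :: t)) with _ | ⟨d, l2⟩ <;> simp

-- the while-loop of A: strip, scan KNOWN_PLATFORMS for a prefix, else split(None, 1)
def tokA (remaining : List Char) : List (List Char) :=
  if hs : PySem.Chars.strip remaining = [] then []
  else
    match hm : pvKnown.find? (fun p => PySem.Chars.startswith (PySem.Chars.strip remaining) p) with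
    | some p => p :: tokA ((PySem.Chars.strip remaining).drop p.length)
    | none =>
      match hw : PySem.Chars.split₀Max (PySem.Chars.strip remaining) 1 with
      | [] => []
      | [w] => w :: tokA []
      | w :: rest :: _ => w :: tokA rest
termination_by remaining.length
decreasing_by
  · have hp : p ∈ pvKnown := List.mem_of_find?_eq_some hm
    have h1 : 1 ≤ p.length := List.length_pos_of_ne_nil (pvKnown_ne_nil p hp)
    have h2 : (PySem.Chars.strip remaining).length ≤ remaining.length := pv_strip_length_le remaining
    have h3 : 1 ≤ (PySem.Chars.strip remaining).length := List.length_pos_of_ne_nil hs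
    simp only [List.length_drop]
    omega
  · have : remaining ≠ [] := by rintro rfl; exact hs rfl
    simpa using List.length_pos_of_ne_nil this
  · obtain ⟨c, t, hc, hnw⟩ := pv_strip_head_not_ws remaining hs
    have hchar := pv_split0Max_one (PySem.Chars.strip remaining) c t hc hnw
    rw [hchar] at hw
    have h2 : (PySem.Chars.strip remaining).length ≤ remaining.length := pv_strip_length_le remaining
    have hct : t.length + 1 = (PySem.Chars.strip remaining).length := by rw [hc]; simp
    have hdd : (List.dropWhile PySem.Chars.isspace
        (List.dropWhile (fun d => !PySem.Chars.isspace d) (PySem.Chars.strip remaining))).length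
        ≤ t.length := by
      calc (List.dropWhile PySem.Chars.isspace
            (List.dropWhile (fun d => !PySem.Chars.isspace d) (PySem.Chars.strip remaining))).length
          ≤ (List.dropWhile (fun d => !PySem.Chars.isspace d) (PySem.Chars.strip remaining)).length :=
            List.length_dropWhile_le _ _
        _ ≤ t.length := by
            rw [hc]
            simpa [hnw] using List.length_dropWhile_le (fun d => !PySem.Chars.isspace d) t
    have hrest : rest.length ≤ t.length := by
      split at hw
      · simp at hw
      · rw [List.cons.injEq, List.cons.injEq] at hw
        rw [hw.2.1] at hdd; exact hdd
    omega

def split_platforms (raw_list : List String) : List String :=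
  if raw_list.isEmpty then []
  else
    let text := PySem.Chars.join [' '] (raw_list.map String.toList)
    let platforms := tokA text
    let st := platforms.foldl (fun (st : PySem.Set (List Char) × List (List Char)) p =>
      let norm := pvAliases.getD p (PySem.Chars.strip (PySem.Chars.replace p "DxTrade".toList "DXTrade".toList))
      if norm.isEmpty then st
      else
        let norm := if PySem.Chars.startswith norm "(".toList && PySem.Chars.endswith norm ")".toList
                    then PySem.Chars.stripChars norm "() ".toList else norm
        let norm := pvAliases.getD norm norm
        if norm.isEmpty || pvNoise.contains norm then st
        else if st.1.contains norm then st
        else (st.1.add norm, st.2 ++ [norm])) (PySem.Set.empty, [])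
    st.2.map String.ofList

-- ===== PORT B =====

-- cursor tokenizer of B: skip whitespace char by char, match a known platform at
-- the cursor, else take the maximal run of non-space characters
def tokB (cs : List Char) : List (List Char) :=
  match cs with
  | [] => []
  | c :: rest =>
    if PySem.Chars.isspace c then tokB rest
    else
      match hm : pvKnown.find? (fun p => PySem.Chars.startswith (c :: rest) p) with
      | some p => p :: tokB ((c :: rest).drop p.length)
      | none =>
        (c :: rest).takeWhile (fun d => !PySem.Chars.isspace d) ::
          tokB ((c :: rest).dropWhile (fun d => !PySem.Chars.isspace d))
termination_by cs.length
decreasing_by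
  · simp
  · have hp : p ∈ pvKnown := List.mem_of_find?_eq_some hm
    have h1 : 1 ≤ p.length := List.length_pos_of_ne_nil (pvKnown_ne_nil p hp)
    simp only [List.length_drop, List.length_cons]
    omega
  · rename_i hnw
    have : List.dropWhile (fun d => !PySem.Chars.isspace d) (c :: rest)
        = List.dropWhile (fun d => !PySem.Chars.isspace d) rest := by
      simp [eq_false_of_ne_true hnw]
    rw [this]
    have := List.length_dropWhile_le (fun d => !PySem.Chars.isspace d) rest
    simp only [List.length_cons]
    omega

def normB (t : List Char) : List Char :=
  let n := pvAliases.getD t (PySem.Chars.strip (PySem.Chars.replace t "DxTrade".toList "DXTrade".toList))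
  let n := if PySem.Chars.startswith n "(".toList && PySem.Chars.endswith n ")".toList
           then PySem.Chars.stripChars n "() ".toList else n
  pvAliases.getD n n

def split_platforms_alt (raw_list : List String) : List String :=
  if raw_list.isEmpty then []
  else
    let tokens := tokB (PySem.Chars.join [' '] (raw_list.map String.toList))
    let normed := tokens.map normB
    let keep := normed.filter (fun t => !t.isEmpty && !pvNoise.contains t)
    (PySem.List.dedup keep).map String.ofList

-- ===== PRECONDITION & SPEC =====
def Spec_split_platforms (raw_list : List String) (out : List String) : Prop := out = split_platforms_alt raw_list
instance (raw_list : List String) (out : List String) : Decidable (Spec_split_platforms raw_list out) := by unfold Spec_split_platforms; infer_instance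

-- ===== CLAIM (what is proved, stated in full; the proofs are below) =====
def Claim_equal_split_platforms : Prop := ∀ (raw_list : List String), Dom_split_platforms raw_list → Spec_split_platforms raw_list (split_platforms raw_list)

-- ===== LEMMAS AND PROOFS =====

-- tokenizer facts
theorem tokB_nil : tokB [] = [] := by rw [tokB]

theorem tokB_cons_ws (c : Char) (rest : List Char) (h : PySem.Chars.isspace c = true) :
    tokB (c :: rest) = tokB rest := by
  rw [tokB]; simp [h]

theorem tokB_cons_plat (c : Char) (rest p : List Char) (hc : PySem.Chars.isspace c = false)
    (hf : pvKnown.find? (fun p => PySem.Chars.startswith (c :: rest) p) = some p) :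
    tokB (c :: rest) = p :: tokB ((c :: rest).drop p.length) := by
  rw [tokB]
  simp only [hc, Bool.false_eq_true, if_false]
  split <;> rename_i heq
  · rw [hf] at heq; injection heq with h; rw [h]
  · rw [hf] at heq; exact absurd heq (by simp)

theorem tokB_cons_word (c : Char) (rest : List Char) (hc : PySem.Chars.isspace c = false)
    (hf : pvKnown.find? (fun p => PySem.Chars.startswith (c :: rest) p) = none) :
    tokB (c :: rest) = (c :: rest).takeWhile (fun d => !PySem.Chars.isspace d) ::
      tokB ((c :: rest).dropWhile (fun d => !PySem.Chars.isspace d)) := by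
  rw [tokB]
  simp only [hc, Bool.false_eq_true, if_false]
  split <;> rename_i heq
  · rw [hf] at heq; exact absurd heq (by simp)
  · rfl

theorem tokB_dropWhile (cs : List Char) :
    tokB (List.dropWhile PySem.Chars.isspace cs) = tokB cs := by
  induction cs with
  | nil => rfl
  | cons c rest ih =>
    by_cases h : PySem.Chars.isspace c
    · rw [List.dropWhile_cons_of_pos (by simpa using h), ih, tokB_cons_ws c rest h]
    · rw [List.dropWhile_cons_of_neg (by simpa using h)]

theorem tokB_allws (cs : List Char) (h : cs.all PySem.Chars.isspace = true) : tokB cs = [] := by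
  rw [← tokB_dropWhile cs, List.dropWhile_eq_nil_iff.mpr (by simpa [List.all_eq_true] using h),
    tokB_nil]

set_option maxRecDepth 4096 in
theorem pvKnown_last_not_ws' :
    ∀ p ∈ pvKnown, p.getLast?.map PySem.Chars.isspace = some false := by decide

theorem pvKnown_last_not_ws :
    ∀ p ∈ pvKnown, ∀ d, p.getLast? = some d → PySem.Chars.isspace d = false := by
  intro p hp d hd
  have := pvKnown_last_not_ws' p hp
  rw [hd] at this
  simpa using this

theorem pv_find?_congr {α : Type} (l : List α) (f g : α → Bool)
    (h : ∀ x ∈ l, f x = g x) : l.find? f = l.find? g := by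
  induction l with
  | nil => rfl
  | cons x xs ih =>
    rw [List.find?_cons, List.find?_cons, h x (by simp)]
    split <;> [rfl; exact ih fun y hy => h y (by simp [hy])]

theorem pv_prefix_append_ws (p u t : List Char) (hp : p ∈ pvKnown)
    (ht : t.all PySem.Chars.isspace = true) :
    p.isPrefixOf (u ++ t) = p.isPrefixOf u := by
  by_cases hu : p.isPrefixOf u
  · rw [hu, List.isPrefixOf_iff_prefix.mpr ((List.isPrefixOf_iff_prefix.mp hu).trans
      (List.prefix_append u t))]
  · have h2 : p.isPrefixOf (u ++ t) = false := by
      apply Bool.eq_false_iff.mpr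
      intro hpt
      have hpt' : p <+: u ++ t := List.isPrefixOf_iff_prefix.mp hpt
      have hlen : u.length < p.length := by
        by_contra hle
        exact hu (List.isPrefixOf_iff_prefix.mpr
          (List.prefix_of_prefix_length_le hpt' (List.prefix_append u t) (by omega)))
      have hup : u <+: p := List.prefix_of_prefix_length_le (List.prefix_append u t) hpt' (by omega)
      obtain ⟨p', rfl⟩ := hup
      have hp'ne : p' ≠ [] := by
        intro h0; rw [h0] at hlen; simp at hlen
      have hp't : p' <+: t := by
        obtain ⟨v, hv⟩ := hpt'
        rw [List.append_assoc] at hv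
        exact ⟨v, (List.append_cancel_left hv)⟩
      obtain ⟨d, hd⟩ : ∃ d, p'.getLast? = some d := by
        cases hpl : p'.getLast? with
        | none => exact absurd (List.getLast?_eq_none_iff.mp hpl) hp'ne
        | some d => exact ⟨d, rfl⟩
      have hdlast : (u ++ p').getLast? = some d := by
        rw [List.getLast?_append_of_ne_nil _ hp'ne, hd]
      have hdt : d ∈ t := hp't.mem (List.mem_of_getLast? hd)
      have : PySem.Chars.isspace d = true := by
        rw [List.all_eq_true] at ht; simpa using ht d hdt
      rw [pvKnown_last_not_ws _ hp d hdlast] at this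
      exact Bool.false_ne_true this
    rw [h2, eq_false_of_ne_true hu]

theorem pv_tw_dw_allws (t : List Char) (ht : t.all PySem.Chars.isspace = true) :
    t.takeWhile (fun d => !PySem.Chars.isspace d) = []
      ∧ t.dropWhile (fun d => !PySem.Chars.isspace d) = t := by
  cases t with
  | nil => simp
  | cons d t' =>
    have hd : PySem.Chars.isspace d = true := by
      rw [List.all_eq_true] at ht; simpa using ht d (by simp)
    constructor
    · rw [List.takeWhile_cons_of_neg (by simp [hd])]
    · rw [List.dropWhile_cons_of_neg (by simp [hd])]

theorem pv_tw_dw_append (p : Char → Bool) (u t : List Char)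
    (h : u.dropWhile p ≠ []) :
    (u ++ t).takeWhile p = u.takeWhile p ∧ (u ++ t).dropWhile p = u.dropWhile p ++ t := by
  induction u with
  | nil => simp at h
  | cons c u' ih =>
    by_cases hc : p c
    · rw [List.dropWhile_cons_of_pos hc] at h ⊢
      obtain ⟨h1, h2⟩ := ih h
      rw [List.cons_append, List.takeWhile_cons_of_pos hc, List.takeWhile_cons_of_pos hc,
        List.dropWhile_cons_of_pos hc, h1, h2]
      simp
    · rw [List.cons_append, List.takeWhile_cons_of_neg hc, List.takeWhile_cons_of_neg hc,
        List.dropWhile_cons_of_neg hc, List.dropWhile_cons_of_neg hc, List.cons_append]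
      simp

theorem tokB_append_ws (u t : List Char) (ht : t.all PySem.Chars.isspace = true) :
    tokB (u ++ t) = tokB u := by
  induction hi : u.length using Nat.strong_induction_on generalizing u with
  | _ n ih =>
  subst hi
  match u with
  | [] => rw [List.nil_append, tokB_nil]; exact tokB_allws t ht
  | c :: u' =>
    by_cases hc : PySem.Chars.isspace c
    · rw [List.cons_append, tokB_cons_ws c _ hc, tokB_cons_ws c _ hc]
      exact ih u'.length (by simp) u' rfl
    · have hcf : PySem.Chars.isspace c = false := eq_false_of_ne_true hc
      have hfind : pvKnown.find? (fun p => PySem.Chars.startswith (c :: (u' ++ t)) p)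
          = pvKnown.find? (fun p => PySem.Chars.startswith (c :: u') p) :=
        pv_find?_congr pvKnown _ _ (fun p hp => by
          have h := pv_prefix_append_ws p (c :: u') t hp ht
          simp only [PySem.Chars.startswith] at h ⊢
          exact h)
      rcases hf : pvKnown.find? (fun p => PySem.Chars.startswith (c :: u') p) with _ | p
      · -- word branch
        rw [List.cons_append, tokB_cons_word c (u' ++ t) hcf (hfind.trans hf),
          tokB_cons_word c u' hcf hf]
        rw [List.takeWhile_cons_of_pos (p := fun d => !PySem.Chars.isspace d) (by simp [hcf]),
          List.takeWhile_cons_of_pos (p := fun d => !PySem.Chars.isspace d) (by simp [hcf]),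
          List.dropWhile_cons_of_pos (p := fun d => !PySem.Chars.isspace d) (by simp [hcf]),
          List.dropWhile_cons_of_pos (p := fun d => !PySem.Chars.isspace d) (by simp [hcf])]
        by_cases hall : ∀ d ∈ u', (!PySem.Chars.isspace d) = true
        · rw [List.takeWhile_append_of_pos hall, List.dropWhile_append_of_pos hall,
            (pv_tw_dw_allws t ht).1, (pv_tw_dw_allws t ht).2,
            List.takeWhile_eq_self_iff.mpr hall, List.dropWhile_eq_nil_iff.mpr hall,
            tokB_allws t ht, tokB_nil]
          simp
        · obtain ⟨htw, hdw2⟩ := pv_tw_dw_append (fun d => !PySem.Chars.isspace d) u' t (by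
            simpa [List.dropWhile_eq_nil_iff] using hall)
          rw [htw, hdw2]
          rw [ih (List.dropWhile (fun d => !PySem.Chars.isspace d) u').length
            (by have := List.length_dropWhile_le (fun d => !PySem.Chars.isspace d) u'
                simp only [List.length_cons]; omega)
            _ rfl]
      · -- platform branch
        have hpre : p <+: (c :: u') := by
          have := List.find?_some hf
          simpa [PySem.Chars.startswith, List.isPrefixOf_iff_prefix] using this
        rw [List.cons_append, tokB_cons_plat c (u' ++ t) p hcf (hfind.trans hf),
          tokB_cons_plat c u' p hcf hf]
        have hsplit : c :: (u' ++ t) = (c :: u') ++ t := rfl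
        rw [hsplit, List.drop_append_of_le_length hpre.length_le]
        rw [ih ((c :: u').drop p.length).length
          (by have h1 : 1 ≤ p.length :=
                List.length_pos_of_ne_nil (pvKnown_ne_nil p (List.mem_of_find?_eq_some hf))
              simp only [List.length_drop, List.length_cons]; omega)
          _ rfl]

-- tokA unfolding lemmas
theorem tokA_of_strip_nil (cs : List Char) (hs : PySem.Chars.strip cs = []) :
    tokA cs = [] := by
  rw [tokA]; simp [hs]

theorem tokA_plat (cs p : List Char) (hs : PySem.Chars.strip cs ≠ [])
    (hf : pvKnown.find? (fun p => PySem.Chars.startswith (PySem.Chars.strip cs) p) = some p) :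
    tokA cs = p :: tokA ((PySem.Chars.strip cs).drop p.length) := by
  rw [tokA]
  rw [dif_neg hs]
  split <;> rename_i heq
  · rw [hf] at heq; injection heq with h; rw [h]
  · rw [hf] at heq; exact absurd heq (by simp)

theorem tokA_word (cs : List Char) (hs : PySem.Chars.strip cs ≠ [])
    (hf : pvKnown.find? (fun p => PySem.Chars.startswith (PySem.Chars.strip cs) p) = none) :
    tokA cs =
      (if List.dropWhile PySem.Chars.isspace
            (List.dropWhile (fun d => !PySem.Chars.isspace d) (PySem.Chars.strip cs)) = []
       then [List.takeWhile (fun d => !PySem.Chars.isspace d) (PySem.Chars.strip cs)]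
       else List.takeWhile (fun d => !PySem.Chars.isspace d) (PySem.Chars.strip cs) ::
         tokA (List.dropWhile PySem.Chars.isspace
            (List.dropWhile (fun d => !PySem.Chars.isspace d) (PySem.Chars.strip cs)))) := by
  obtain ⟨c, t, hc, hnw⟩ := pv_strip_head_not_ws cs hs
  have hchar := pv_split0Max_one (PySem.Chars.strip cs) c t hc hnw
  by_cases hrest : List.dropWhile PySem.Chars.isspace
      (List.dropWhile (fun d => !PySem.Chars.isspace d) (PySem.Chars.strip cs)) = []
  · rw [if_pos hrest]
    rw [hrest, if_pos rfl] at hchar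
    rw [tokA, dif_neg hs]
    split <;> rename_i heq
    · rw [hf] at heq; exact absurd heq (by simp)
    · split <;> rename_i hw
      · rw [hchar] at hw; simp at hw
      · rw [hchar] at hw
        injection hw with h1 h2
        rw [h1, tokA_of_strip_nil [] rfl]
      · rw [hchar] at hw; simp at hw
  · rw [if_neg hrest]
    rw [if_neg hrest] at hchar
    rw [tokA, dif_neg hs]
    split <;> rename_i heq
    · rw [hf] at heq; exact absurd heq (by simp)
    · split <;> rename_i hw
      · rw [hchar] at hw; simp at hw
      · rw [hchar] at hw
        rw [List.cons.injEq] at hw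
        exact absurd hw.2 (by simp)
      · rw [hchar] at hw
        rw [List.cons.injEq, List.cons.injEq] at hw
        rw [hw.1, hw.2.1]

theorem pv_strip_nil_dropWhile (cs : List Char) (hs : PySem.Chars.strip cs = []) :
    List.dropWhile PySem.Chars.isspace cs = [] := by
  by_contra hne
  obtain ⟨d, l2, hd⟩ := List.exists_cons_of_ne_nil hne
  have hdws : PySem.Chars.isspace d = false := by
    have := List.head?_dropWhile_not PySem.Chars.isspace cs
    rw [hd] at this; simpa using this
  have hall : ∀ x ∈ (List.dropWhile PySem.Chars.isspace cs).reverse, PySem.Chars.isspace x := by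
    have : List.dropWhile PySem.Chars.isspace
        (List.dropWhile PySem.Chars.isspace cs).reverse = [] := by
      have := hs
      simp only [PySem.Chars.strip, PySem.Chars.rstrip, PySem.Chars.lstrip] at this
      simpa using this
    exact List.dropWhile_eq_nil_iff.mp this
  have := hall d (by rw [hd]; simp)
  rw [hdws] at this; exact Bool.false_ne_true this

theorem pv_strip_decomp (cs : List Char) :
    ∃ tl, List.dropWhile PySem.Chars.isspace cs = PySem.Chars.strip cs ++ tl
      ∧ tl.all PySem.Chars.isspace = true := by
  refine ⟨(List.takeWhile PySem.Chars.isspace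
    (List.dropWhile PySem.Chars.isspace cs).reverse).reverse, ?_, ?_⟩
  · simp only [PySem.Chars.strip, PySem.Chars.rstrip, PySem.Chars.lstrip]
    rw [← List.reverse_append, List.takeWhile_append_dropWhile, List.reverse_reverse]
  · rw [List.all_eq_true]
    intro x hx
    exact List.mem_takeWhile_imp (by simpa using hx)

theorem tok_eq (cs : List Char) : tokA cs = tokB cs := by
  induction hi : cs.length using Nat.strong_induction_on generalizing cs with
  | _ n ih =>
  subst hi
  by_cases hs : PySem.Chars.strip cs = []
  · rw [tokA_of_strip_nil cs hs, ← tokB_dropWhile cs, pv_strip_nil_dropWhile cs hs, tokB_nil]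
  · obtain ⟨c, t, hc, hnw⟩ := pv_strip_head_not_ws cs hs
    obtain ⟨tl, hdec, htl⟩ := pv_strip_decomp cs
    have hBstrip : tokB cs = tokB (PySem.Chars.strip cs) := by
      rw [← tokB_dropWhile cs, hdec, tokB_append_ws _ _ htl]
    have hlen : (PySem.Chars.strip cs).length ≤ cs.length := pv_strip_length_le cs
    have hlent : t.length + 1 = (PySem.Chars.strip cs).length := by rw [hc]; simp
    rcases hf : pvKnown.find? (fun p => PySem.Chars.startswith (PySem.Chars.strip cs) p)
      with _ | p
    · -- word branch
      have hfct : pvKnown.find? (fun p => PySem.Chars.startswith (c :: t) p) = none := by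
        rw [← hc]; exact hf
      rw [tokA_word cs hs hf, hBstrip, hc, tokB_cons_word c t hnw hfct, ← hc]
      have hBdw : tokB (List.dropWhile (fun d => !PySem.Chars.isspace d) (PySem.Chars.strip cs))
          = tokB (List.dropWhile PySem.Chars.isspace
              (List.dropWhile (fun d => !PySem.Chars.isspace d) (PySem.Chars.strip cs))) := by
        rw [tokB_dropWhile]
      have hdwlen : (List.dropWhile PySem.Chars.isspace
          (List.dropWhile (fun d => !PySem.Chars.isspace d) (PySem.Chars.strip cs))).length
            ≤ t.length := by
        calc (List.dropWhile PySem.Chars.isspace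
              (List.dropWhile (fun d => !PySem.Chars.isspace d) (PySem.Chars.strip cs))).length
            ≤ (List.dropWhile (fun d => !PySem.Chars.isspace d)
                (PySem.Chars.strip cs)).length := List.length_dropWhile_le _ _
          _ ≤ t.length := by
              rw [hc]
              simpa [hnw] using List.length_dropWhile_le (fun d => !PySem.Chars.isspace d) t
      split <;> rename_i hrest
      · rw [hBdw, hrest, tokB_nil]
      · rw [hBdw]
        rw [ih (List.dropWhile PySem.Chars.isspace
          (List.dropWhile (fun d => !PySem.Chars.isspace d) (PySem.Chars.strip cs))).length
          (by omega) _ rfl]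
    · -- platform branch
      have hfct : pvKnown.find? (fun p2 => PySem.Chars.startswith (c :: t) p2) = some p := by
        rw [← hc]; exact hf
      have h1 : 1 ≤ p.length :=
        List.length_pos_of_ne_nil (pvKnown_ne_nil p (List.mem_of_find?_eq_some hf))
      rw [tokA_plat cs p hs hf, hBstrip, hc, tokB_cons_plat c t p hnw hfct, ← hc]
      rw [ih ((PySem.Chars.strip cs).drop p.length).length
        (by simp only [List.length_drop]; omega) _ rfl]

-- dedup machinery: ddA mirrors A's seen/out loop relative to a starting seen-set
def pvKeep (t : List Char) : Bool := !t.isEmpty && !pvNoise.contains t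

def ddA (seen : PySem.Set (List Char)) : List (List Char) → List (List Char)
  | [] => []
  | x :: xs => if seen.contains x then ddA seen xs else x :: ddA (seen.add x) xs

theorem dd_foldl_add (l : List (List Char)) (seen : PySem.Set (List Char)) :
    l.foldl PySem.Set.add seen = seen ++ ddA seen l := by
  induction l generalizing seen with
  | nil => simp [ddA]
  | cons x xs ih =>
    rw [List.foldl_cons, ih, ddA]
    by_cases h : seen.contains x
    · rw [if_pos h]
      simp only [PySem.Set.add, h, if_true]
    · rw [if_neg h]
      simp only [PySem.Set.add, h, Bool.false_eq_true, if_false]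
      rw [List.append_assoc, List.singleton_append]

theorem pv_ite_keep (st : PySem.Set (List Char) × List (List Char)) (n : List Char) :
    (if n.isEmpty || pvNoise.contains n then st
     else if st.1.contains n then st else (st.1.add n, st.2 ++ [n]))
    = (if !n.isEmpty && !pvNoise.contains n then
         (if st.1.contains n then st else (st.1.add n, st.2 ++ [n])) else st) := by
  cases hE : n.isEmpty <;> cases hN : pvNoise.contains n <;> simp

theorem stepA_eq (st : PySem.Set (List Char) × List (List Char)) (p : List Char) :
    (let norm := pvAliases.getD p (PySem.Chars.strip (PySem.Chars.replace p "DxTrade".toList "DXTrade".toList))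
     if norm.isEmpty then st
     else
       let norm := if PySem.Chars.startswith norm "(".toList && PySem.Chars.endswith norm ")".toList
                   then PySem.Chars.stripChars norm "() ".toList else norm
       let norm := pvAliases.getD norm norm
       if norm.isEmpty || pvNoise.contains norm then st
       else if st.1.contains norm then st
       else (st.1.add norm, st.2 ++ [norm]))
    = (if pvKeep (normB p) then
         (if st.1.contains (normB p) then st else (st.1.add (normB p), st.2 ++ [normB p]))
       else st) := by
  by_cases h1 : (pvAliases.getD p
      (PySem.Chars.strip (PySem.Chars.replace p "DxTrade".toList "DXTrade".toList))).isEmpty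
  · have h0 : pvAliases.getD p
        (PySem.Chars.strip (PySem.Chars.replace p "DxTrade".toList "DXTrade".toList)) = [] :=
      List.isEmpty_iff.mp h1
    have hnB : normB p = [] := by
      simp only [normB, h0]
      decide
    simp only [h0, List.isEmpty_nil, if_true, hnB]
    simp [pvKeep]
  · have h1f : (pvAliases.getD p
        (PySem.Chars.strip (PySem.Chars.replace p "DxTrade".toList "DXTrade".toList))).isEmpty
          = false := eq_false_of_ne_true h1
    simp only [normB, pvKeep, h1f, Bool.false_eq_true, if_false]
    exact pv_ite_keep st _

theorem foldA (l : List (List Char)) (seen : PySem.Set (List Char)) (out : List (List Char)) :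
    (l.foldl (fun (st : PySem.Set (List Char) × List (List Char)) p =>
      let norm := pvAliases.getD p (PySem.Chars.strip (PySem.Chars.replace p "DxTrade".toList "DXTrade".toList))
      if norm.isEmpty then st
      else
        let norm := if PySem.Chars.startswith norm "(".toList && PySem.Chars.endswith norm ")".toList
                    then PySem.Chars.stripChars norm "() ".toList else norm
        let norm := pvAliases.getD norm norm
        if norm.isEmpty || pvNoise.contains norm then st
        else if st.1.contains norm then st
        else (st.1.add norm, st.2 ++ [norm])) (seen, out)).2
    = out ++ ddA seen ((l.map normB).filter pvKeep) := by
  induction l generalizing seen out with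
  | nil => simp [ddA]
  | cons x xs ih =>
    rw [List.foldl_cons, stepA_eq (seen, out) x]
    by_cases hk : pvKeep (normB x)
    · rw [if_pos hk, List.map_cons, List.filter_cons_of_pos hk, ddA]
      by_cases hc : PySem.Set.contains seen (normB x)
      · rw [if_pos hc]
        simp only [hc, if_true]
        exact ih seen out
      · rw [if_neg hc]
        simp only [hc, Bool.false_eq_true, if_false]
        rw [ih (seen.add (normB x)) (out ++ [normB x]), List.append_assoc, List.singleton_append]
    · rw [if_neg hk, List.map_cons, List.filter_cons_of_neg hk]
      exact ih seen out

-- ===== VERDICT (by name: the statement is the Claim_ definition above) =====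
theorem split_platforms_spec : Claim_equal_split_platforms := by
  unfold Claim_equal_split_platforms
  intro raw_list _
  unfold Spec_split_platforms
  by_cases h : raw_list.isEmpty
  · simp only [split_platforms, split_platforms_alt, h, if_true]
  · simp only [split_platforms, split_platforms_alt, h, Bool.false_eq_true, if_false]
    rw [tok_eq, foldA]
    congr 1
    show ddA PySem.Set.empty _ = PySem.List.dedup _
    rw [PySem.List.dedup, PySem.Set.ofList_eq_foldl, dd_foldl_add]
    rfl
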